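-- pv_equiv track=rewrite | github.com/academic-resources/stared-repos | container2/LambdaSchool/m7/71a1/applications/expensive_seq/expensive_seq.py | expensive_seq
-- ===== SOURCE A (Python) =====
-- cache = {}
--
-- def expensive_seq(x, y, z):
--     if x <= 0:
--
--         return y + z
--
--     if x > 0:
--         # calc prev/nexts
--         prevX1 = x - 1
--         prevX2 = x - 2
--         prevX3 = x - 3
--
--         nextY1 = y + 1
--         nextY2 = y + 2
--         nextY3 = y + 3
--
--         nextZ2 = z * 2
--         nextZ3 = z * 3
--
--         if str((prevX1, nextY1, z)) in cache:
--             seq1out = cache.get(str((prevX1, nextY1, z)))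
--         else:
--             seq1out = expensive_seq(prevX1, nextY1, z)
--             cache.update({str((prevX1, nextY1, z)): seq1out})
--
--         if str((prevX2, nextY2, nextZ2)) in cache:
--             seq2out = cache.get(str((prevX2, nextY2, nextZ2)))
--         else:
--             seq2out = expensive_seq(prevX2, nextY2, nextZ2)
--             cache.update({str((prevX2, nextY2, nextZ2)): seq2out})
--
--         if str((prevX3, nextY3, nextZ3)) in cache:
--             seq3out = cache.get(str((prevX3, nextY3, nextZ3)))
--         else:
--             seq3out = expensive_seq(prevX3, nextY3, nextZ3)
--             cache.update({str((prevX3, nextY3, nextZ3)): seq3out})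
--
--         total_seq = seq1out + seq2out + seq3out
--
--     return total_seq
-- ===== SOURCE B (Python) =====
-- def expensive_seq(x, y, z):
--     # f(t, y, z) is linear in y and z: f(t, y, z) = p + q*y + r*z for a coefficient
--     # triple (p, q, r) depending on t only.  Walk the chain x, x-1, x-2, ... down to
--     # its non-positive tail, then build the triples bottom-up, keeping the last three.
--     steps = 0
--     t = x
--     while t > 0:
--         t -= 1
--         steps += 1
--     c1 = c2 = c3 = (0, 1, 1)  # triples for the three non-positive chain points
--     for _ in range(steps):
--         p1, q1, r1 = c1
--         p2, q2, r2 = c2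
--         p3, q3, r3 = c3
--         c1, c2, c3 = (p1 + p2 + p3 + q1 + 2 * q2 + 3 * q3,
--                       q1 + q2 + q3,
--                       r1 + 2 * r2 + 3 * r3), c1, c2
--     p, q, r = c1
--     return p + q * y + r * z
-- ===== Notes on version B (the rewrite author's own statement) =====
-- stated objective: faster
-- what changed: B exploits that the recurrence is linear in y and z: it builds coefficient triples (p,q,r) with f(t,y,z)=p+q*y+r*z bottom-up in a single O(x)-step loop keeping only the last three triples, eliminating the recursion and the global str-keyed cache whose number of distinct (x,y,z) states blows up with x.
import Mathlib
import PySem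

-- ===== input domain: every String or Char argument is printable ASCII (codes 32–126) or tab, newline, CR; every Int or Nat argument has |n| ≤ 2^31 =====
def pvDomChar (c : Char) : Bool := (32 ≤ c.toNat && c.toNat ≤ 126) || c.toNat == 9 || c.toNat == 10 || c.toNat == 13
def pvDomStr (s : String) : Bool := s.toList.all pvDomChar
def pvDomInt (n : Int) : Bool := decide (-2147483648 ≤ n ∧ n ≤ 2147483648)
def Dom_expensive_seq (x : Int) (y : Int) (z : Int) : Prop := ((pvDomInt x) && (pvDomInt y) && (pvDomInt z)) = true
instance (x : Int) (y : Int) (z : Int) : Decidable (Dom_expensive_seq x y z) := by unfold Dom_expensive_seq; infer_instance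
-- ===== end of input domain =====

-- B replaces A's three-way recursion threading y and z (with a global str-keyed cache)
-- by a single bottom-up loop over coefficient triples, using that f is linear in y and z (objective: faster; measured).

-- ===== PORT A =====
-- A's memoized recursion, with the cache threaded explicitly (Python mutates a global dict;
-- the port starts each top-level call with an empty cache, which affects only speed: the cache
-- only ever stores values of this same pure recursion). The cache is a hash map keyed by the
-- triple itself, matching Python's O(1) dict; Python's key str((x, y, z)) is injective on int
-- triples, so hit/miss behaviour is identical.
def expensiveSeqMemo (x : Int) (y : Int) (z : Int)
    (cache : Std.HashMap (Int × Int × Int) Int) : Int × Std.HashMap (Int × Int × Int) Int :=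
  if x ≤ 0 then (y + z, cache)
  else
    -- seq1out
    let r1 :=
      match cache[((x - 1, y + 1, z) : Int × Int × Int)]? with
      | some v => (v, cache)
      | none =>
        let r := expensiveSeqMemo (x - 1) (y + 1) z cache
        (r.1, r.2.insert (x - 1, y + 1, z) r.1)
    -- seq2out
    let r2 :=
      match r1.2[((x - 2, y + 2, z * 2) : Int × Int × Int)]? with
      | some v => (v, r1.2)
      | none =>
        let r := expensiveSeqMemo (x - 2) (y + 2) (z * 2) r1.2
        (r.1, r.2.insert (x - 2, y + 2, z * 2) r.1)
    -- seq3out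
    let r3 :=
      match r2.2[((x - 3, y + 3, z * 3) : Int × Int × Int)]? with
      | some v => (v, r2.2)
      | none =>
        let r := expensiveSeqMemo (x - 3) (y + 3) (z * 3) r2.2
        (r.1, r.2.insert (x - 3, y + 3, z * 3) r.1)
    (r1.1 + r2.1 + r3.1, r3.2)
termination_by x.toNat
decreasing_by all_goals omega

def expensive_seq (x : Int) (y : Int) (z : Int) : Int :=
  (expensiveSeqMemo x y z ∅).1

-- ===== PORT B =====
def expensiveStepsOf (t : Int) : Nat :=
  if t > 0 then expensiveStepsOf (t - 1) + 1 else 0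
termination_by t.toNat
decreasing_by omega

def expensiveCoeffStep (s : (Int × Int × Int) × (Int × Int × Int) × (Int × Int × Int)) :
    (Int × Int × Int) × (Int × Int × Int) × (Int × Int × Int) :=
  ((s.1.1 + s.2.1.1 + s.2.2.1 + s.1.2.1 + 2 * s.2.1.2.1 + 3 * s.2.2.2.1,
    s.1.2.1 + s.2.1.2.1 + s.2.2.2.1,
    s.1.2.2 + 2 * s.2.1.2.2 + 3 * s.2.2.2.2),
   s.1, s.2.1)

def expensive_seq_alt (x : Int) (y : Int) (z : Int) : Int :=
  let s := (List.range (expensiveStepsOf x)).foldl (fun s _ => expensiveCoeffStep s)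
    (((0, 1, 1), (0, 1, 1), (0, 1, 1)))
  s.1.1 + s.1.2.1 * y + s.1.2.2 * z

-- ===== PRECONDITION & SPEC =====
-- Python A recurses with depth x; under CPython's default recursion limit it raises
-- RecursionError for x ≥ 997 (and returns for every x ≤ 996, any y, z). B returns there.
def Pre_expensive_seq (x : Int) (y : Int) (z : Int) : Prop := x ≤ 996
instance (x : Int) (y : Int) (z : Int) : Decidable (Pre_expensive_seq x y z) := by unfold Pre_expensive_seq; infer_instance
def pvWitness_expensive_seq : Int × Int × Int := (5, 2, 3)

def Spec_expensive_seq (x : Int) (y : Int) (z : Int) (out : Int) : Prop := out = expensive_seq_alt x y z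
instance (x : Int) (y : Int) (z : Int) (out : Int) : Decidable (Spec_expensive_seq x y z out) := by unfold Spec_expensive_seq; infer_instance

-- ===== CLAIM (what is proved, stated in full; the proofs are below) =====
def Claim_equal_expensive_seq : Prop := ∀ (x : Int) (y : Int) (z : Int), Dom_expensive_seq x y z → Pre_expensive_seq x y z → Spec_expensive_seq x y z (expensive_seq x y z)

-- ===== LEMMAS AND PROOFS =====

-- the plain (uncached) recursion; the invariant below says the cache only holds its values
def seqPure (x : Int) (y : Int) (z : Int) : Int :=
  if x ≤ 0 then y + z
  else
    seqPure (x - 1) (y + 1) z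
      + seqPure (x - 2) (y + 2) (z * 2)
      + seqPure (x - 3) (y + 3) (z * 3)
termination_by x.toNat
decreasing_by all_goals omega

-- the coefficient triple of the linear form f(x, y, z) = p + q*y + r*z
def coeffsP (x : Int) : Int × Int × Int :=
  if x ≤ 0 then (0, 1, 1)
  else
    let c1 := coeffsP (x - 1)
    let c2 := coeffsP (x - 2)
    let c3 := coeffsP (x - 3)
    (c1.1 + c2.1 + c3.1 + c1.2.1 + 2 * c2.2.1 + 3 * c3.2.1,
     c1.2.1 + c2.2.1 + c3.2.1,
     c1.2.2 + 2 * c2.2.2 + 3 * c3.2.2)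
termination_by x.toNat
decreasing_by all_goals omega

theorem coeffsP_base (t : Int) (ht : t ≤ 0) : coeffsP t = (0, 1, 1) := by
  rw [coeffsP]; simp [ht]

def GoodCache (m : Std.HashMap (Int × Int × Int) Int) : Prop :=
  ∀ (p : Int × Int × Int) (v : Int), m[p]? = some v → v = seqPure p.1 p.2.1 p.2.2

theorem goodCache_insert {m : Std.HashMap (Int × Int × Int) Int} (hc : GoodCache m)
    (k : Int × Int × Int) (v : Int) (hv : v = seqPure k.1 k.2.1 k.2.2) :
    GoodCache (m.insert k v) := by
  intro p w hw
  rw [Std.HashMap.getElem?_insert] at hw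
  by_cases hpk : k = p
  · subst hpk; simp at hw; omega
  · simp [hpk] at hw; exact hc p w hw

-- one lookup-or-recurse step preserves the invariant and returns the pure value
theorem memo_step (a b c : Int) (d : Std.HashMap (Int × Int × Int) Int)
    (hd : GoodCache d)
    (hrec : (expensiveSeqMemo a b c d).1 = seqPure a b c ∧ GoodCache (expensiveSeqMemo a b c d).2) :
    (match d[((a, b, c) : Int × Int × Int)]? with
      | some v => (v, d)
      | none =>
        let r := expensiveSeqMemo a b c d
        (r.1, r.2.insert (a, b, c) r.1)).1 = seqPure a b c ∧
    GoodCache (match d[((a, b, c) : Int × Int × Int)]? with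
      | some v => (v, d)
      | none =>
        let r := expensiveSeqMemo a b c d
        (r.1, r.2.insert (a, b, c) r.1)).2 := by
  cases hg : d[((a, b, c) : Int × Int × Int)]? with
  | some v => exact ⟨hd _ _ hg, by simpa [hg] using hd⟩
  | none =>
    refine ⟨hrec.1, ?_⟩
    exact goodCache_insert hrec.2 (a, b, c) _ (by simpa using hrec.1)

theorem memo_correct (n : Nat) :
    ∀ (x y z : Int) (mc : Std.HashMap (Int × Int × Int) Int), x.toNat ≤ n → GoodCache mc →
      (expensiveSeqMemo x y z mc).1 = seqPure x y z ∧ GoodCache (expensiveSeqMemo x y z mc).2 := by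
  induction n using Nat.strong_induction_on with
  | _ n ih =>
    intro x y z mc hx hc
    by_cases h : x ≤ 0
    · rw [expensiveSeqMemo, seqPure]; simp [h, hc]
    · have hn : 0 < n := by omega
      rw [expensiveSeqMemo]
      simp only [h, if_false]
      have h1 := memo_step (x - 1) (y + 1) z mc hc
        (ih (n - 1) (by omega) (x - 1) (y + 1) z mc (by omega) hc)
      set r1 := (match mc[((x - 1, y + 1, z) : Int × Int × Int)]? with
        | some v => (v, mc)
        | none =>
          let r := expensiveSeqMemo (x - 1) (y + 1) z mc
          (r.1, r.2.insert (x - 1, y + 1, z) r.1)) with hr1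
      have h2 := memo_step (x - 2) (y + 2) (z * 2) r1.2 h1.2
        (ih (n - 1) (by omega) (x - 2) (y + 2) (z * 2) r1.2 (by omega) h1.2)
      set r2 := (match r1.2[((x - 2, y + 2, z * 2) : Int × Int × Int)]? with
        | some v => (v, r1.2)
        | none =>
          let r := expensiveSeqMemo (x - 2) (y + 2) (z * 2) r1.2
          (r.1, r.2.insert (x - 2, y + 2, z * 2) r.1)) with hr2
      have h3 := memo_step (x - 3) (y + 3) (z * 3) r2.2 h2.2
        (ih (n - 1) (by omega) (x - 3) (y + 3) (z * 3) r2.2 (by omega) h2.2)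
      set r3 := (match r2.2[((x - 3, y + 3, z * 3) : Int × Int × Int)]? with
        | some v => (v, r2.2)
        | none =>
          let r := expensiveSeqMemo (x - 3) (y + 3) (z * 3) r2.2
          (r.1, r.2.insert (x - 3, y + 3, z * 3) r.1)) with hr3
      refine ⟨?_, h3.2⟩
      rw [seqPure]
      simp only [h, if_false]
      rw [h1.1, h2.1, h3.1]

theorem goodCache_empty : GoodCache (∅ : Std.HashMap (Int × Int × Int) Int) := by
  intro p v hv
  simp at hv

theorem seqPure_eq_coeffsP (n : Nat) :
    ∀ (x y z : Int), x.toNat ≤ n →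
      seqPure x y z = (coeffsP x).1 + (coeffsP x).2.1 * y + (coeffsP x).2.2 * z := by
  induction n using Nat.strong_induction_on with
  | _ n ih =>
    intro x y z hx
    by_cases h : x ≤ 0
    · rw [seqPure, coeffsP]
      simp [h]
    · have hn : 0 < n := by omega
      rw [seqPure, coeffsP]
      simp only [h, if_false]
      rw [ih (n - 1) (by omega) (x - 1) (y + 1) z (by omega),
          ih (n - 1) (by omega) (x - 2) (y + 2) (z * 2) (by omega),
          ih (n - 1) (by omega) (x - 3) (y + 3) (z * 3) (by omega)]
      ring

theorem stepsOf_eq_toNat (n : Nat) : ∀ (t : Int), t.toNat ≤ n → expensiveStepsOf t = t.toNat := by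
  induction n with
  | zero =>
    intro t ht
    rw [expensiveStepsOf]
    have h : ¬ (t > 0) := by omega
    simp only [h, if_false]
    omega
  | succ n ih =>
    intro t ht
    rw [expensiveStepsOf]
    by_cases h : t > 0
    · simp only [h, if_true]
      rw [ih (t - 1) (by omega)]
      omega
    · simp only [h, if_false]
      omega

-- the loop state after n iterations: the coefficient triples at n, n-1, n-2
theorem foldl_coeffStep (n : Nat) :
    (List.range n).foldl (fun s _ => expensiveCoeffStep s) (((0, 1, 1), (0, 1, 1), (0, 1, 1)))
      = (coeffsP n, coeffsP ((n : Int) - 1), coeffsP ((n : Int) - 2)) := by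
  induction n with
  | zero =>
    simp only [List.range_zero, List.foldl_nil, Nat.cast_zero]
    rw [coeffsP_base 0 (by norm_num), coeffsP_base (0 - 1) (by norm_num),
        coeffsP_base (0 - 2) (by norm_num)]
  | succ n ih =>
    rw [List.range_succ, List.foldl_append, ih]
    simp only [List.foldl_cons, List.foldl_nil]
    have h1 : ((n : Int) + 1) - 1 = (n : Int) := by ring
    have hpos : ¬ (((n : Int) + 1) ≤ 0) := by omega
    rw [show ((n + 1 : Nat) : Int) = (n : Int) + 1 by push_cast; ring]
    conv_rhs => rw [coeffsP]
    simp only [hpos, if_false]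
    rw [expensiveCoeffStep]
    have e1 : (n : Int) + 1 - 1 = (n : Int) := by ring
    have e2 : (n : Int) + 1 - 2 = (n : Int) - 1 := by ring
    have e3 : (n : Int) + 1 - 3 = (n : Int) - 2 := by ring
    rw [e1, e2, e3]

theorem coeffsP_toNat (x : Int) : coeffsP (x.toNat : Int) = coeffsP x := by
  by_cases h : x ≤ 0
  · have h0 : (x.toNat : Int) = 0 := by omega
    rw [h0, coeffsP_base 0 (by norm_num), coeffsP_base x h]
  · congr 1
    omega

-- ===== VERDICT (by name: the statement is the Claim_ definition above) =====
theorem expensive_seq_spec : Claim_equal_expensive_seq := by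
  intro x y z _ _
  unfold Spec_expensive_seq expensive_seq expensive_seq_alt
  rw [(memo_correct x.toNat x y z ∅ le_rfl goodCache_empty).1]
  rw [seqPure_eq_coeffsP x.toNat x y z le_rfl]
  simp only [stepsOf_eq_toNat x.toNat x le_rfl, foldl_coeffStep, coeffsP_toNat]
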